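-- pv_equiv track=rewrite | github.com/Dohwon/260319_llm_tool_hub | server.py | _validate_extension_client_id
-- ===== SOURCE A (Python) =====
-- class ProviderAPIError(Exception):
--     def __init__(self, status_code, message):
--         super().__init__(message)
--         self.status_code = status_code
--         self.message = message
--
-- def _validate_extension_client_id(client_id):
--     value = str(client_id or "").strip()
--     if not value:
--         raise ProviderAPIError(400, "clientId가 필요합니다.")
--     allowed = set("abcdefghijklmnopqrstuvwxyzABCDEFGHIJKLMNOPQRSTUVWXYZ0123456789-_")
--     if any(char not in allowed for char in value):
--         raise ProviderAPIError(400, "clientId 형식이 올바르지 않습니다.")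
--     return value
-- ===== SOURCE B (Python) =====
-- class ProviderAPIError(Exception):
--     def __init__(self, status_code, message):
--         super().__init__(message)
--         self.status_code = status_code
--         self.message = message
--
-- _ALLOWED = frozenset("abcdefghijklmnopqrstuvwxyzABCDEFGHIJKLMNOPQRSTUVWXYZ0123456789-_")
--
-- def _validate_extension_client_id(client_id):
--     chars = list(str(client_id or ""))
--     while chars and chars[0].isspace():
--         del chars[0]
--     while chars and chars[-1].isspace():
--         del chars[-1]
--     if not chars:
--         raise ProviderAPIError(400, "clientId가 필요합니다.")
--     if not set(chars) <= _ALLOWED: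
--         raise ProviderAPIError(400, "clientId 형식이 올바르지 않습니다.")
--     return "".join(chars)
-- ===== Notes on version B (the rewrite author's own statement) =====
-- stated objective: alternative
-- what changed: B works on an explicit list of characters: it strips whitespace with two pop-loops (front and back) instead of str.strip, validates by comparing the SET of distinct characters against a frozenset with a subset test instead of a per-character any-scan, and rebuilds the string with join.
import Mathlib
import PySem

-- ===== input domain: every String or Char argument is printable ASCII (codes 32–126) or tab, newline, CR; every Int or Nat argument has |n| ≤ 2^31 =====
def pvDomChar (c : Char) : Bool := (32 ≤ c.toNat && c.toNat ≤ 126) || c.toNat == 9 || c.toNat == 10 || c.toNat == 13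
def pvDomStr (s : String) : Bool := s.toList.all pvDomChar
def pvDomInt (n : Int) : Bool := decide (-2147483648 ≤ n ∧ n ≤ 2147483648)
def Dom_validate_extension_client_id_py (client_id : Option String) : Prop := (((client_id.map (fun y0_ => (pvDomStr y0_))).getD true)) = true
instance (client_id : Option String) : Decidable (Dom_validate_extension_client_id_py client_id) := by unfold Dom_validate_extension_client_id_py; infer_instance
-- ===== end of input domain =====

-- B strips whitespace with two explicit pop-loops over a character list and validates via a
-- subset test on the SET of distinct characters, instead of A's str.strip + per-char any-scan
-- (alternative decomposition; return value proved equal on Pre_).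

-- ===== PORT A =====
-- allowed = set("abcdefghijklmnopqrstuvwxyzABCDEFGHIJKLMNOPQRSTUVWXYZ0123456789-_")
def pvAllowedSet : PySem.Set Char :=
  PySem.Set.ofList "abcdefghijklmnopqrstuvwxyzABCDEFGHIJKLMNOPQRSTUVWXYZ0123456789-_".toList

def validate_extension_client_id_py (client_id : Option String) : String :=
  let value := PySem.Str.strip (client_id.getD "")
  if value = "" then ""  -- raise ProviderAPIError(400, …): excluded by Pre_
  else if value.toList.any (fun char => !(PySem.Set.contains pvAllowedSet char)) then ""  -- raise: excluded by Pre_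
  else value

-- ===== PORT B =====
-- _ALLOWED = frozenset("…")
def pvAllowedFro : PySem.Set Char :=
  PySem.Set.ofList "abcdefghijklmnopqrstuvwxyzABCDEFGHIJKLMNOPQRSTUVWXYZ0123456789-_".toList

-- while chars and chars[0].isspace(): del chars[0]
def pvPopFront : List Char → List Char
  | [] => []
  | c :: rest => if PySem.Chars.isspace c then pvPopFront rest else c :: rest

-- while chars and chars[-1].isspace(): del chars[-1]
def pvPopBack (l : List Char) : List Char :=
  match hl : l.getLast? with
  | none => l
  | some c => if PySem.Chars.isspace c then pvPopBack l.dropLast else l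
termination_by l.length
decreasing_by
  have : l ≠ [] := by intro h; subst h; simp at hl
  simpa [List.length_dropLast] using Nat.sub_lt (List.length_pos_iff.mpr this) Nat.one_pos

def validate_extension_client_id_py_alt (client_id : Option String) : String :=
  let chars := pvPopBack (pvPopFront (client_id.getD "").toList)
  if chars.isEmpty then ""  -- raise: excluded by Pre_
  else if !(PySem.Set.issubset (PySem.Set.ofList chars) pvAllowedFro) then ""  -- raise: excluded by Pre_
  else String.ofList chars  -- "".join(chars): concatenation of the single characters (exact)

-- ===== PRECONDITION & SPEC =====
-- Pre_ excludes exactly the inputs on which A raises ProviderAPIError: an empty/whitespace-only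
-- (or None) client_id, or one containing a character outside [A-Za-z0-9_-] after stripping.
def Pre_validate_extension_client_id_py (client_id : Option String) : Prop :=
  (PySem.Str.strip (client_id.getD "")).toList ≠ [] ∧
  ((PySem.Str.strip (client_id.getD "")).toList.all
    (fun c => "abcdefghijklmnopqrstuvwxyzABCDEFGHIJKLMNOPQRSTUVWXYZ0123456789-_".toList.contains c)) = true
instance (client_id : Option String) : Decidable (Pre_validate_extension_client_id_py client_id) := by
  unfold Pre_validate_extension_client_id_py; infer_instance

def pvWitness_validate_extension_client_id_py : Option String := some "a"

def Spec_validate_extension_client_id_py (client_id : Option String) (out : String) : Prop := out = validate_extension_client_id_py_alt client_id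
instance (client_id : Option String) (out : String) : Decidable (Spec_validate_extension_client_id_py client_id out) := by unfold Spec_validate_extension_client_id_py; infer_instance

-- ===== CLAIM (what is proved, stated in full; the proofs are below) =====
def Claim_equal_validate_extension_client_id_py : Prop := ∀ (client_id : Option String), Dom_validate_extension_client_id_py client_id → Pre_validate_extension_client_id_py client_id → Spec_validate_extension_client_id_py client_id (validate_extension_client_id_py client_id)

-- ===== LEMMAS AND PROOFS =====
-- B's front pop-loop is lstrip
theorem pvPopFront_eq (l : List Char) : pvPopFront l = PySem.Chars.lstrip l := by
  induction l with
  | nil => simp [pvPopFront, PySem.Chars.lstrip]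
  | cons c rest ih =>
    by_cases h : PySem.Chars.isspace c = true <;>
      simp [pvPopFront, PySem.Chars.lstrip, List.dropWhile, h] at ih ⊢ <;> simpa [h] using ih

-- B's back pop-loop is rstrip
theorem pvPopBack_eq (l : List Char) : pvPopBack l = PySem.Chars.rstrip l := by
  induction l using List.reverseRecOn with
  | nil => simp [pvPopBack, PySem.Chars.rstrip]
  | append_singleton l c ih =>
    rw [pvPopBack]
    split
    next heq => simp at heq
    next c' heq =>
      rw [List.getLast?_concat] at heq
      obtain rfl : c = c' := by simpa using heq
      rw [List.dropLast_concat]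
      by_cases h : PySem.Chars.isspace c = true
      · simp [h, ih, PySem.Chars.rstrip, List.dropWhile]
      · simp [h, PySem.Chars.rstrip, List.dropWhile]

-- so B's stripped char list is A's stripped string, as a list
theorem pvStrip_eq (s : String) :
    pvPopBack (pvPopFront s.toList) = (PySem.Str.strip s).toList := by
  rw [pvPopFront_eq, pvPopBack_eq, PySem.Str.toList_strip, PySem.Chars.strip]

theorem pvAllowed_contains :
    ∀ c ∈ "abcdefghijklmnopqrstuvwxyzABCDEFGHIJKLMNOPQRSTUVWXYZ0123456789-_".toList,
      PySem.Set.contains pvAllowedFro c = true := by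
  intro c h
  rw [PySem.Set.contains_iff]
  unfold pvAllowedFro
  rw [PySem.Set.mem_ofList]
  exact h

-- ===== VERDICT (by name: the statement is the Claim_ definition above) =====
theorem validate_extension_client_id_py_spec : Claim_equal_validate_extension_client_id_py := by
  intro client_id _ hpre
  obtain ⟨hnil, hallb⟩ := hpre
  have hne : PySem.Str.strip (client_id.getD "") ≠ "" := by
    intro h; apply hnil; rw [h]; simp
  have hall : ∀ c ∈ (PySem.Str.strip (client_id.getD "")).toList,
      c ∈ "abcdefghijklmnopqrstuvwxyzABCDEFGHIJKLMNOPQRSTUVWXYZ0123456789-_".toList := by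
    intro c hc
    have := List.all_eq_true.mp hallb c hc
    simpa using this
  unfold Spec_validate_extension_client_id_py
  unfold validate_extension_client_id_py validate_extension_client_id_py_alt
  rw [pvStrip_eq]
  simp only [if_neg hne]
  have hA : ((PySem.Str.strip (client_id.getD "")).toList.any
      (fun char => !(PySem.Set.contains pvAllowedSet char))) = false := by
    simp only [List.any_eq_false, Bool.not_eq_true', Bool.not_eq_false]
    intro c hc
    have := pvAllowed_contains c (hall c hc)
    simpa [pvAllowedFro, pvAllowedSet] using this
  have hEmp : ((PySem.Str.strip (client_id.getD "")).toList.isEmpty) = false := by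
    simpa [List.isEmpty_iff] using hnil
  have hB : PySem.Set.issubset (PySem.Set.ofList (PySem.Str.strip (client_id.getD "")).toList)
      pvAllowedFro = true := by
    unfold PySem.Set.issubset
    refine List.all_eq_true.mpr fun c hc => ?_
    exact pvAllowed_contains c (hall c ((PySem.Set.mem_ofList _ _).mp hc))
  rw [hA, hEmp, hB]
  simp [← PySem.Str.toList_strip]
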